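-- pv_equiv track=rewrite | github.com/panagiota02/panagiota | Panayiota_final/1.py | diakonia_aristera
-- ===== SOURCE A (Python) =====
-- def diakonia_aristera(tetrag, diast): #diagonia -> /
--     cnt=0
--     a=diast-2
--     z=2
--     for stili in range(a,z,-1):
--         x=0
--         for j in range(stili,z,-1):
--               vrika_tetrada=True
--               w=x
--               for d in range(j,j-4,-1):
--                  if (tetrag[w][d]//10 != 0):
--                       vrika_tetrada=False
--                  w+=1
--               if vrika_tetrada == True:
--                       cnt+=1
--               x+=1
--
--     return cnt
-- ===== SOURCE B (Python) =====
-- def diakonia_aristera(tetrag, diast):  # diagonia -> /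
--     cnt = 0
--     for s in range(3, diast - 1):      # anti-diagonal index: row + col == s
--         run = 0                        # consecutive single-digit cells ending here
--         for t in range(s + 1):
--             if tetrag[t][s - t] // 10 == 0:
--                 run += 1
--                 if run >= 4:
--                     cnt += 1
--             else:
--                 run = 0
--     return cnt
-- ===== Notes on version B (the rewrite author's own statement) =====
-- stated objective: simpler
-- what changed: B walks each anti-diagonal once keeping a running count of consecutive single-digit cells (counting every time the run reaches 4), instead of A's re-scan of all 4 cells for every window start, removing the innermost 4-cell loop.
import Mathlib
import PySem

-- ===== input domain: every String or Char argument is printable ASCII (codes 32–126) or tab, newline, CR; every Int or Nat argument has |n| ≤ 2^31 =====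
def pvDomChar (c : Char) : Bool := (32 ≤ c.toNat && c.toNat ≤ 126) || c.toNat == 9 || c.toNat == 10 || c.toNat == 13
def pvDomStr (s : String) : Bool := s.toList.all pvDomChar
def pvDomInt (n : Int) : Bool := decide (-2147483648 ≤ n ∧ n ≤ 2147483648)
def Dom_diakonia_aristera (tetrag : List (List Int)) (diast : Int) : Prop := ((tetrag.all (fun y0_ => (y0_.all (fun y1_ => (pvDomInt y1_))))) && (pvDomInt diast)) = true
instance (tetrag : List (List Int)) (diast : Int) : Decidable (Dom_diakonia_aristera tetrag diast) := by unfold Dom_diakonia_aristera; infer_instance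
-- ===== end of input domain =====

-- B replaces A's per-window 4-cell rescan by a single run-length pass along each
-- anti-diagonal (objective: simpler; same cells, same count; speed not measured).

-- ===== PORT A =====
def diakonia_aristera (tetrag : List (List Int)) (diast : Int) : Int :=
  ((PySem.List.pyRange (diast - 2) 2 (-1)).foldl (fun cnt stili =>
    ((PySem.List.pyRange stili 2 (-1)).foldl (fun (st : Int × Int) j =>
        let inner := (PySem.List.pyRange j (j - 4) (-1)).foldl
          (fun (vw : Bool × Int) d =>
            ((if PySem.Int.floordiv (PySem.List.pyGetD (PySem.List.pyGetD tetrag vw.2 []) d 0) 10 ≠ 0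
               then false else vw.1),
             vw.2 + 1))
          (true, st.2)
        ((if inner.1 = true then st.1 + 1 else st.1), st.2 + 1))
      (cnt, 0)).1)
    0)

-- ===== PORT B =====
def diakonia_aristera_alt (tetrag : List (List Int)) (diast : Int) : Int :=
  (PySem.List.pyRange 3 (diast - 1) 1).foldl (fun cnt s =>
    ((PySem.List.pyRange 0 (s + 1) 1).foldl (fun (cr : Int × Int) t =>
        if PySem.Int.floordiv (PySem.List.pyGetD (PySem.List.pyGetD tetrag t []) (s - t) 0) 10 = 0 then
          ((if 4 ≤ cr.2 + 1 then cr.1 + 1 else cr.1), cr.2 + 1)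
        else (cr.1, 0))
      (cnt, 0)).1)
    0

-- ===== PRECONDITION & SPEC =====
-- Pre_: exactly the inputs where Python A returns (no IndexError): for diast ≥ 5 it reads
-- every cell (r,c) with 3 ≤ r+c ≤ diast-2, so row r (0 ≤ r ≤ diast-2) must have length ≥ diast-1-r.
def Pre_diakonia_aristera (tetrag : List (List Int)) (diast : Int) : Prop :=
  5 ≤ diast → ((diast - 1) ≤ (tetrag.length : Int) ∧
    ∀ i ∈ List.range (diast - 1).toNat, (diast - 1 - (i : Int)) ≤ ((tetrag.getD i []).length : Int))
instance (tetrag : List (List Int)) (diast : Int) : Decidable (Pre_diakonia_aristera tetrag diast) := by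
  unfold Pre_diakonia_aristera; infer_instance
def pvWitness_diakonia_aristera : List (List Int) × Int :=
  ([[1, 2, 33, 4], [5, 6, 7], [44, 8], [9]], 5)
def Spec_diakonia_aristera (tetrag : List (List Int)) (diast : Int) (out : Int) : Prop := out = diakonia_aristera_alt tetrag diast
instance (tetrag : List (List Int)) (diast : Int) (out : Int) : Decidable (Spec_diakonia_aristera tetrag diast out) := by unfold Spec_diakonia_aristera; infer_instance

-- ===== CLAIM (what is proved, stated in full; the proofs are below) =====
def Claim_equal_diakonia_aristera : Prop := ∀ (tetrag : List (List Int)) (diast : Int), Dom_diakonia_aristera tetrag diast → Pre_diakonia_aristera tetrag diast → Spec_diakonia_aristera tetrag diast (diakonia_aristera tetrag diast)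

-- ===== LEMMAS AND PROOFS =====

-- cell predicate along anti-diagonal s: gOK tetrag s r ↔ tetrag[r][s-r] // 10 == 0
def gOK (tetrag : List (List Int)) (s r : Int) : Bool :=
  decide (PySem.Int.floordiv (PySem.List.pyGetD (PySem.List.pyGetD tetrag r []) (s - r) 0) 10 = 0)

-- indicator of a good 4-window starting at row x
def winI (g : Int → Bool) (x : Int) : Int :=
  if (g x && g (x + 1) && g (x + 2) && g (x + 3)) = true then 1 else 0

-- A's per-diagonal count: sum of winI over m consecutive starting rows
def AW (g : Int → Bool) : Nat → Int → Int
  | 0, _ => 0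
  | m + 1, x => winI g x + AW g m (x + 1)

-- B's per-diagonal fold, transcribed on (row, run length)
def CW (g : Int → Bool) : Nat → Int → Int → Int
  | 0, _, _ => 0
  | m + 1, t, r => if g t then (if 4 ≤ r + 1 then 1 else 0) + CW g m (t + 1) (r + 1)
                   else CW g m (t + 1) 0

-- windows indexed by their END row
def EW (g : Int → Bool) : Nat → Int → Int
  | 0, _ => 0
  | m + 1, t => (if 3 ≤ t ∧ (g (t - 3) && g (t - 2) && g (t - 1) && g t) = true then 1 else 0)
                + EW g m (t + 1)

lemma pyRange_four (j : Int) :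
    PySem.List.pyRange j (j - 4) (-1) = [j, j - 1, j - 2, j - 3] := by
  have h4 : (j - (j - 4)).toNat = 4 := by omega
  rw [PySem.List.pyRange_neg_one, h4]
  simp [List.range_succ]

lemma ite_ne_false (P : Prop) [Decidable P] (b : Bool) :
    (if ¬ P then false else b) = (decide P && b) := by
  by_cases h : P <;> simp [h]

lemma bool_chain4 (a b c d : Bool) :
    (d && (c && (b && (a && true)))) = (a && b && c && d) := by
  cases a <;> cases b <;> cases c <;> cases d <;> rfl

lemma A_inner (tetrag : List (List Int)) (x j : Int) :
    (PySem.List.pyRange j (j - 4) (-1)).foldl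
      (fun (vw : Bool × Int) d =>
        ((if PySem.Int.floordiv (PySem.List.pyGetD (PySem.List.pyGetD tetrag vw.2 []) d 0) 10 ≠ 0
           then false else vw.1),
         vw.2 + 1))
      (true, x)
    = (gOK tetrag (x + j) x && gOK tetrag (x + j) (x + 1) && gOK tetrag (x + j) (x + 2)
        && gOK tetrag (x + j) (x + 3), x + 4) := by
  rw [pyRange_four]
  simp only [List.foldl, gOK]
  refine Prod.ext ?_ ?_
  · show _ = _
    have ex : x + 1 + 1 + 1 = x + 3 := by ring
    have ex2 : x + 1 + 1 = x + 2 := by ring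
    have e1 : x + j - x = j := by ring
    have e2 : x + j - (x + 1) = j - 1 := by ring
    have e3 : x + j - (x + 2) = j - 2 := by ring
    have e4 : x + j - (x + 3) = j - 3 := by ring
    rw [ex, ex2, e1, e2, e3, e4]
    simp only [ne_eq, ite_ne_false]
    exact bool_chain4 _ _ _ _
  · show x + 1 + 1 + 1 + 1 = x + 4
    ring

lemma A_mid' (tetrag : List (List Int)) (s : Int) :
    ∀ (m : Nat) (cnt x : Int), (s - x - 2).toNat = m →
      (List.foldl (fun (st : Int × Int) j =>
        ((if (gOK tetrag (st.2 + j) st.2 && gOK tetrag (st.2 + j) (st.2 + 1) &&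
              gOK tetrag (st.2 + j) (st.2 + 2) && gOK tetrag (st.2 + j) (st.2 + 3)) = true
          then st.1 + 1 else st.1), st.2 + 1))
        (cnt, x) (PySem.List.pyRange (s - x) 2 (-1)))
      = (cnt + AW (gOK tetrag s) m x, x + m) := by
  intro m
  induction m with
  | zero =>
    intro cnt x h
    rw [PySem.List.pyRange_neg_one_eq_nil (by omega)]
    simp [AW]
  | succ m ih =>
    intro cnt x h
    rw [PySem.List.pyRange_neg_one_cons (by omega : (2:Int) < s - x), List.foldl_cons]
    dsimp only
    have hx : x + (s - x) = s := by ring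
    have h1 : s - x - 1 = s - (x + 1) := by ring
    rw [hx, h1, ih _ (x + 1) (by omega)]
    refine Prod.ext ?_ ?_
    · show _ = cnt + AW (gOK tetrag s) (m + 1) x
      simp only [AW, winI]
      split <;> omega
    · show x + 1 + (m : Int) = x + ((m : Int) + 1)
      ring

lemma A_mid (tetrag : List (List Int)) (s : Int) :
    ∀ (m : Nat) (cnt x : Int), (s - x - 2).toNat = m →
      ((PySem.List.pyRange (s - x) 2 (-1)).foldl (fun (st : Int × Int) j =>
        let inner := (PySem.List.pyRange j (j - 4) (-1)).foldl
          (fun (vw : Bool × Int) d =>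
            ((if PySem.Int.floordiv (PySem.List.pyGetD (PySem.List.pyGetD tetrag vw.2 []) d 0) 10 ≠ 0
               then false else vw.1),
             vw.2 + 1))
          (true, st.2)
        ((if inner.1 = true then st.1 + 1 else st.1), st.2 + 1))
        (cnt, x))
      = (cnt + AW (gOK tetrag s) m x, x + m) := by
  intro m cnt x h
  simp only [A_inner]
  exact A_mid' tetrag s m cnt x h

lemma B_mid (tetrag : List (List Int)) (s : Int) :
    ∀ (m : Nat) (t0 cnt r : Int), (s + 1 - t0).toNat = m →
      ((PySem.List.pyRange t0 (s + 1) 1).foldl (fun (cr : Int × Int) t =>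
        if PySem.Int.floordiv (PySem.List.pyGetD (PySem.List.pyGetD tetrag t []) (s - t) 0) 10 = 0 then
          ((if 4 ≤ cr.2 + 1 then cr.1 + 1 else cr.1), cr.2 + 1)
        else (cr.1, 0))
        (cnt, r)).1
      = cnt + CW (gOK tetrag s) m t0 r := by
  intro m
  induction m with
  | zero =>
    intro t0 cnt r h
    rw [PySem.List.pyRange_one_eq_nil (by omega)]
    simp [CW]
  | succ m ih =>
    intro t0 cnt r h
    rw [PySem.List.pyRange_one_cons (by omega : t0 < s + 1), List.foldl_cons]
    dsimp only
    by_cases hg : gOK tetrag s t0 = true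
    · have hc : PySem.Int.floordiv (PySem.List.pyGetD (PySem.List.pyGetD tetrag t0 []) (s - t0) 0) 10 = 0 := by
        simpa [gOK] using hg
      rw [if_pos hc, ih (t0 + 1) _ (r + 1) (by omega)]
      simp only [CW, hg, if_true]
      split <;> omega
    · have hc : ¬ PySem.Int.floordiv (PySem.List.pyGetD (PySem.List.pyGetD tetrag t0 []) (s - t0) 0) 10 = 0 := by
        simpa [gOK] using hg
      rw [if_neg hc, ih (t0 + 1) _ 0 (by omega)]
      simp [CW, hg]

lemma CW_eq_EW (g : Int → Bool) :
    ∀ (m : Nat) (t r : Int), 0 ≤ r → r ≤ t →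
      (∀ k : Int, 1 ≤ k → k ≤ r → g (t - k) = true) →
      (r = t ∨ g (t - r - 1) = false) →
      CW g m t r = EW g m t := by
  intro m
  induction m with
  | zero => intro t r _ _ _ _; rfl
  | succ m ih =>
    intro t r h0 hrt hrun hmax
    by_cases hg : g t = true
    · have key : (4 ≤ r + 1) ↔ (3 ≤ t ∧ (g (t - 3) && g (t - 2) && g (t - 1) && g t) = true) := by
        constructor
        · intro h4
          refine ⟨by omega, ?_⟩
          have g1 : g (t - 1) = true := hrun 1 (by omega) (by omega)
          have g2 : g (t - 2) = true := hrun 2 (by omega) (by omega)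
          have g3 : g (t - 3) = true := hrun 3 (by omega) (by omega)
          simp [g1, g2, g3, hg]
        · rintro ⟨ht3, hall⟩
          by_contra hlt
          have hfalse : g (t - r - 1) = false := hmax.resolve_left (by omega)
          simp only [Bool.and_eq_true] at hall
          obtain ⟨⟨⟨ha3, ha2⟩, ha1⟩, -⟩ := hall
          have : r = 0 ∨ r = 1 ∨ r = 2 := by omega
          rcases this with rfl | rfl | rfl
          · rw [show t - 0 - 1 = t - 1 by ring, ha1] at hfalse; simp at hfalse
          · rw [show t - 1 - 1 = t - 2 by ring, ha2] at hfalse; simp at hfalse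
          · rw [show t - 2 - 1 = t - 3 by ring, ha3] at hfalse; simp at hfalse
      have tail : CW g m (t + 1) (r + 1) = EW g m (t + 1) := by
        refine ih (t + 1) (r + 1) (by omega) (by omega) ?_ ?_
        · intro k hk1 hkr
          by_cases hk : k = 1
          · rw [hk, show t + 1 - 1 = t by ring]; exact hg
          · rw [show t + 1 - k = t - (k - 1) by ring]
            exact hrun (k - 1) (by omega) (by omega)
        · rcases hmax with h | h
          · left; omega
          · right; rw [show t + 1 - (r + 1) - 1 = t - r - 1 by ring]; exact h
      simp only [CW, EW]
      rw [if_pos hg, tail]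
      by_cases h4 : 4 ≤ r + 1
      · rw [if_pos h4, if_pos (key.mp h4)]
      · rw [if_neg h4, if_neg (fun hp => h4 (key.mpr hp))]
    · have hgf : g t = false := by simpa using hg
      have tail : CW g m (t + 1) 0 = EW g m (t + 1) := by
        refine ih (t + 1) 0 (by omega) (by omega) (by omega) ?_
        right; rw [show t + 1 - 0 - 1 = t by ring]; exact hgf
      simp [CW, EW, hgf, tail]

lemma EW_eq_AW (g : Int → Bool) :
    ∀ (m : Nat) (t : Int), 3 ≤ t → EW g m t = AW g m (t - 3) := by
  intro m
  induction m with
  | zero => intro t _; rfl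
  | succ m ih =>
    intro t ht
    simp only [EW, AW, winI]
    rw [ih (t + 1) (by omega), show t + 1 - 3 = t - 3 + 1 by ring]
    congr 1
    rw [show t - 3 + 1 = t - 2 by ring, show t - 3 + 2 = t - 1 by ring,
        show t - 3 + 3 = t by ring]
    simp [ht]

lemma EW_zero_eq_AW (g : Int → Bool) (m : Nat) : EW g (m + 3) 0 = AW g m 0 := by
  have e3 : EW g m 3 = AW g m 0 := by
    rw [EW_eq_AW g m 3 (by norm_num)]; norm_num
  show EW g (m + 1 + 1 + 1) 0 = AW g m 0
  simp only [EW]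
  norm_num [e3]

-- per-diagonal count, shared characterisation of both ports
def Fdiag (tetrag : List (List Int)) (s : Int) : Int := AW (gOK tetrag s) (s - 2).toNat 0

lemma A_diag (tetrag : List (List Int)) (cnt stili : Int) :
    ((PySem.List.pyRange stili 2 (-1)).foldl (fun (st : Int × Int) j =>
        let inner := (PySem.List.pyRange j (j - 4) (-1)).foldl
          (fun (vw : Bool × Int) d =>
            ((if PySem.Int.floordiv (PySem.List.pyGetD (PySem.List.pyGetD tetrag vw.2 []) d 0) 10 ≠ 0
               then false else vw.1),
             vw.2 + 1))
          (true, st.2)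
        ((if inner.1 = true then st.1 + 1 else st.1), st.2 + 1))
      (cnt, 0)).1 = cnt + Fdiag tetrag stili := by
  have h := A_mid tetrag stili ((stili - 2).toNat) cnt 0 (by omega)
  rw [show stili - (0:Int) = stili by ring] at h
  rw [h, Fdiag]

lemma B_diag (tetrag : List (List Int)) (cnt s : Int) (hs : 3 ≤ s) :
    ((PySem.List.pyRange 0 (s + 1) 1).foldl (fun (cr : Int × Int) t =>
        if PySem.Int.floordiv (PySem.List.pyGetD (PySem.List.pyGetD tetrag t []) (s - t) 0) 10 = 0 then
          ((if 4 ≤ cr.2 + 1 then cr.1 + 1 else cr.1), cr.2 + 1)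
        else (cr.1, 0))
      (cnt, 0)).1 = cnt + Fdiag tetrag s := by
  rw [B_mid tetrag s ((s + 1).toNat) 0 cnt 0 (by omega)]
  rw [CW_eq_EW (gOK tetrag s) ((s + 1).toNat) 0 0 le_rfl le_rfl
      (by intro k hk1 hk0; omega) (Or.inl rfl)]
  rw [show (s + 1).toNat = (s - 2).toNat + 3 by omega]
  rw [EW_zero_eq_AW, Fdiag]

theorem ports_agree (tetrag : List (List Int)) (diast : Int) :
    diakonia_aristera tetrag diast = diakonia_aristera_alt tetrag diast := by
  unfold diakonia_aristera diakonia_aristera_alt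
  rw [PySem.List.foldl_congr_mem _ _ (fun (cnt stili : Int) => cnt + Fdiag tetrag stili) _
        (fun acc x _ => A_diag tetrag acc x)]
  rw [PySem.List.foldl_congr_mem _ _ (fun (cnt s : Int) => cnt + Fdiag tetrag s) _
        (fun acc x hx => B_diag tetrag acc x (PySem.List.mem_pyRange_one.mp hx).1)]
  rw [PySem.List.foldl_add, PySem.List.foldl_add]
  rw [PySem.List.pyRange_neg_one_eq_reverse]
  rw [show (2:Int) + 1 = 3 by norm_num, show diast - 2 + 1 = diast - 1 by ring]
  rw [List.map_reverse, List.sum_reverse]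

-- ===== VERDICT (by name: the statement is the Claim_ definition above) =====
theorem diakonia_aristera_spec : Claim_equal_diakonia_aristera := by
  intro tetrag diast _ _
  unfold Spec_diakonia_aristera
  exact ports_agree tetrag diast
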